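-- pv_equiv track=rewrite | github.com/runarmod/adventofcode | 2016/11/main.py | state_equivalent
-- ===== SOURCE A (Python) =====
-- def state_equivalent(state1, state2):
--     """
--     Two states does not have to be equal to be equivalent
--     Example:
--     [{1}, {-1}, {2, -2}]
--     can be considered the same as
--     [{2}, {-2}, {1, -1}]
--     """
--     floors1, elevator1 = state1
--     floors2, elevator2 = state2
--     if elevator1 != elevator2:
--         return False
--     if any(len(floors1[i]) != len(floors2[i]) for i in range(4)):
--         return False
--     max_i = max(max(floor) for floor in floors1 if len(floor) > 0)
--
--     floors = {0: floors1, 1: floors2}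
--     pair_floors = {0: set(), 1: set()}
--     for id in range(2):
--         for i in range(1, max_i + 1):
--             positive = None
--             negative = None
--             for floor_nr in range(len(floors[id])):
--                 if i in floors[id][floor_nr]:
--                     if negative is None:
--                         positive = floor_nr
--                     else:
--                         pair_floors[id].add((negative, floor_nr))
--                         break
--                 if -i in floors[id][floor_nr]:
--                     if positive is None:
--                         negative = floor_nr
--                     else:
--                         pair_floors[id].add((floor_nr, positive))
--                         break
--     return pair_floors[0] == pair_floors[1]
-- ===== SOURCE B (Python) =====
-- def state_equivalent(state1, state2):
--     floors1, elevator1 = state1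
--     floors2, elevator2 = state2
--     if elevator1 != elevator2:
--         return False
--     if [len(f) for f in floors1[:4]] != [len(f) for f in floors2[:4]]:
--         return False
--     max_i = max(x for floor in floors1 for x in floor)
--
--     def pairs(floors):
--         pos = {}
--         for floor_nr, floor in enumerate(floors):
--             for x in floor:
--                 pos.setdefault(x, floor_nr)
--         return {(pos[-i], pos[i]) for i in range(1, max_i + 1)
--                 if i in pos and -i in pos}
--
--     return pairs(floors1) == pairs(floors2)
-- ===== Notes on version B (the rewrite author's own statement) =====
-- stated objective: alternative
-- what changed: B replaces A's per-magnitude stateful rescan of all floors by a value-to-floor index dict built once per state (pairs then formed by two lookups per magnitude), compares the first four floor sizes as sliced length lists instead of an any() scan, and takes the max over the flattened floors instead of a max of per-floor maxes. Pre_ excludes inputs where A raises (a state's floor list shorter than the four indices the length check reaches, or all floors of state1 empty) and states in which some value occupies more than one floor, where A's last-seen-before-partner pairing is accidental.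
-- outside the precondition, e.g. on state_equivalent(([{1}, {2}], 0), ([{1}, {2}], 0)): A raises IndexError, B returns True
import Mathlib
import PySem

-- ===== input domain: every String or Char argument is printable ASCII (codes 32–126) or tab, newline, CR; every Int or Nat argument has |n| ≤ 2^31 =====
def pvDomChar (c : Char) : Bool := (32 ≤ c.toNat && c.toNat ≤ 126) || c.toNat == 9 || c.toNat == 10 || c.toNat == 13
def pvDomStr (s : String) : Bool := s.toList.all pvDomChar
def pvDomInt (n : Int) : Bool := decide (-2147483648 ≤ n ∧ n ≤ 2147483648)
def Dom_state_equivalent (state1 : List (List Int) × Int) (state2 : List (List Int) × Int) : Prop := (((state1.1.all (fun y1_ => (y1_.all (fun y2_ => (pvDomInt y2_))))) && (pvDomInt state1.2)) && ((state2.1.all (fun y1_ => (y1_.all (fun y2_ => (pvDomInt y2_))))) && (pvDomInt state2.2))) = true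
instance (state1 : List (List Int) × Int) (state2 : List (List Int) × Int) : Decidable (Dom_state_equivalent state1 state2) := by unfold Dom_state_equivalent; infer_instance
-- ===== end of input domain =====

-- B builds a value→floor index dict once per state and forms each generator/chip pair by two
-- lookups, compares sliced length lists and takes the max of the flattened floors, instead of
-- A's per-magnitude stateful rescan of all floors (objective: alternative).

-- ===== PORT A =====
-- any(len(floors1[i]) != len(floors2[i]) for i in range(4)); none = IndexError
def pvLenAny (f1 f2 : List (List Int)) : List Nat → Option Bool
  | [] => some false
  | i :: rest =>
    match f1[i]?, f2[i]? with
    | some a, some b => if a.length ≠ b.length then some true else pvLenAny f1 f2 rest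
    | _, _ => none

-- max(max(floor) for floor in floors1 if len(floor) > 0); none = ValueError
def pvMaxA (floors : List (List Int)) : Option Int :=
  PySem.List.max?
    ((floors.filter (fun f => decide (0 < f.length))).map
      (fun f => (PySem.List.max? f (fun x => x)).getD 0))
    (fun x => x)

-- the inner 'for floor_nr in range(len(floors[id]))' loop of A for one magnitude i:
-- state (floor_nr, positive, negative); returns the pair added at the break, if any
def pvScan (i : Int) : List (List Int) → Int → Option Int → Option Int → Option (Int × Int)
  | [], _, _, _ => none
  | floor :: rest, fn, pos, neg =>
    if floor.contains i then
      match neg with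
      | some n => some (n, fn)
      | none =>
        if floor.contains (-i) then some (fn, fn)
        else pvScan i rest (fn + 1) (some fn) neg
    else if floor.contains (-i) then
      match pos with
      | some p => some (fn, p)
      | none => pvScan i rest (fn + 1) pos (some fn)
    else pvScan i rest (fn + 1) pos neg

-- 'for i in range(1, max_i + 1): … pair_floors[id].add(…)'
def pvPairsA (floors : List (List Int)) (maxi : Int) : PySem.Set (Int × Int) :=
  (PySem.List.pyRange 1 (maxi + 1) 1).foldl
    (fun s i =>
      match pvScan i floors 0 none none with
      | some p => PySem.Set.add s p
      | none => s)
    PySem.Set.empty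

def state_equivalent (state1 : List (List Int) × Int) (state2 : List (List Int) × Int) : Bool :=
  let floors1 := state1.1
  let floors2 := state2.1
  if state1.2 ≠ state2.2 then false
  else
    match pvLenAny floors1 floors2 [0, 1, 2, 3] with
    | none => false        -- IndexError (outside Pre_)
    | some true => false
    | some false =>
      match pvMaxA floors1 with
      | none => false      -- ValueError (outside Pre_)
      | some maxi =>
        PySem.Set.equal (pvPairsA floors1 maxi) (pvPairsA floors2 maxi)

-- ===== PORT B =====
-- [len(f) for f in floors[:4]]
def pvLens4 (floors : List (List Int)) : List Int :=
  (PySem.List.slice floors none (some 4)).map PySem.List.len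

-- max(x for floor in floors for x in floor); none = ValueError
def pvMaxFlat (floors : List (List Int)) : Option Int :=
  PySem.List.max? (floors.flatMap (fun f => f)) (fun x => x)

-- pos = {}; for floor_nr, floor in enumerate(floors): for x in floor: pos.setdefault(x, floor_nr)
def pvBuildPos (floors : List (List Int)) : PySem.Dict Int Int :=
  (PySem.List.enumerate floors 0).foldl
    (fun d p => p.2.foldl (fun d x => if d.contains x then d else d.insert x p.1) d)
    PySem.Dict.empty

-- {(pos[-i], pos[i]) for i in range(1, max_i + 1) if i in pos and -i in pos}
def pvPairsB (floors : List (List Int)) (maxi : Int) : PySem.Set (Int × Int) :=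
  (PySem.List.pyRange 1 (maxi + 1) 1).foldl
    (fun s i =>
      match (pvBuildPos floors).get? (-i), (pvBuildPos floors).get? i with
      | some n, some p => PySem.Set.add s (n, p)
      | _, _ => s)
    PySem.Set.empty

def state_equivalent_alt (state1 : List (List Int) × Int) (state2 : List (List Int) × Int) : Bool :=
  if state1.2 ≠ state2.2 then false
  else if pvLens4 state1.1 ≠ pvLens4 state2.1 then false
  else
    match pvMaxFlat state1.1 with
    | none => false        -- ValueError (outside Pre_)
    | some maxi =>
      PySem.Set.equal (pvPairsB state1.1 maxi) (pvPairsB state2.1 maxi)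

-- ===== PRECONDITION & SPEC =====
-- Pre_ excludes inputs on which A raises (a floor list shorter than the four indices the
-- length check reaches, or all floors of state1 empty) and — although A returns there —
-- states in which some value occupies more than one floor, where A's pairing (the last
-- floor of a value seen before its partner) is an accident of its scan.
def Pre_state_equivalent (state1 : List (List Int) × Int) (state2 : List (List Int) × Int) : Prop :=
  state1.2 ≠ state2.2
  ∨ (∃ i < min 4 (min state1.1.length state2.1.length),
      (state1.1.getD i []).length ≠ (state2.1.getD i []).length)
  ∨ (4 ≤ state1.1.length ∧ 4 ≤ state2.1.length
      ∧ (∃ f ∈ state1.1, f ≠ ([] : List Int))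
      ∧ state1.1.Pairwise (fun a b => ∀ x ∈ a, x ∉ b)
      ∧ state2.1.Pairwise (fun a b => ∀ x ∈ a, x ∉ b))

instance (state1 : List (List Int) × Int) (state2 : List (List Int) × Int) : Decidable (Pre_state_equivalent state1 state2) := by unfold Pre_state_equivalent; infer_instance

def pvWitness_state_equivalent : (List (List Int) × Int) × (List (List Int) × Int) :=
  (([[1], [-1], [2, -2], []], 0), ([[2], [-2], [1, -1], []], 0))

def Spec_state_equivalent (state1 : List (List Int) × Int) (state2 : List (List Int) × Int) (out : Bool) : Prop := out = state_equivalent_alt state1 state2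
instance (state1 : List (List Int) × Int) (state2 : List (List Int) × Int) (out : Bool) : Decidable (Spec_state_equivalent state1 state2 out) := by unfold Spec_state_equivalent; infer_instance

-- ===== CLAIM (what is proved, stated in full; the proofs are below) =====
def Claim_equal_state_equivalent : Prop := ∀ (state1 : List (List Int) × Int) (state2 : List (List Int) × Int), Dom_state_equivalent state1 state2 → Pre_state_equivalent state1 state2 → Spec_state_equivalent state1 state2 (state_equivalent state1 state2)

-- ===== LEMMAS AND PROOFS =====

-- A's scan once the positive floor is known and i occurs in no remaining floor
theorem pvScan_pos (i : Int) (floors : List (List Int)) (fn : Int) (p : Int)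
    (h : ∀ f ∈ floors, i ∉ f) :
    pvScan i floors fn (some p) none
      = (floors.findIdx? (fun f => decide ((-i) ∈ f))).map (fun b => ((fn + (b : Int)), p)) := by
  induction floors generalizing fn with
  | nil => rfl
  | cons f rest ih =>
      have hf : i ∉ f := h f (by simp)
      rw [pvScan]
      by_cases hn : (-i) ∈ f
      · simp [hf, hn, List.findIdx?_cons]
      · simp only [List.contains_iff_mem, hf, hn, decide_false, if_false, List.findIdx?_cons]
        rw [ih (fn + 1) (fun g hg => h g (by simp [hg]))]
        cases rest.findIdx? (fun f => decide ((-i) ∈ f)) with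
        | none => simp
        | some b => simp; ring_nf

theorem pvScan_neg (i : Int) (floors : List (List Int)) (fn : Int) (n : Int)
    (h : ∀ f ∈ floors, (-i) ∉ f) :
    pvScan i floors fn none (some n)
      = (floors.findIdx? (fun f => decide (i ∈ f))).map (fun a => (n, (fn + (a : Int)))) := by
  induction floors generalizing fn with
  | nil => rfl
  | cons f rest ih =>
      have hf : (-i) ∉ f := h f (by simp)
      rw [pvScan]
      by_cases hp : i ∈ f
      · simp [hp, List.findIdx?_cons]
      · simp only [List.contains_iff_mem, hp, hf, decide_false, if_false, List.findIdx?_cons]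
        rw [ih (fn + 1) (fun g hg => h g (by simp [hg]))]
        cases rest.findIdx? (fun f => decide (i ∈ f)) with
        | none => simp
        | some a => simp; ring_nf

-- A's scan from the initial state, on pairwise-disjoint floors
theorem pvScan_eq (i : Int) (floors : List (List Int)) (fn : Int)
    (hd : floors.Pairwise (fun a b => ∀ x ∈ a, x ∉ b)) :
    pvScan i floors fn none none
      = match floors.findIdx? (fun f => decide ((-i) ∈ f)), floors.findIdx? (fun f => decide (i ∈ f)) with
        | some b, some a => some ((fn + (b : Int)), (fn + (a : Int)))
        | _, _ => none := by
  induction floors generalizing fn with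
  | nil => rfl
  | cons f rest ih =>
      rw [List.pairwise_cons] at hd
      obtain ⟨hrel, hrest⟩ := hd
      rw [pvScan]
      by_cases hp : i ∈ f
      · by_cases hn : (-i) ∈ f
        · simp [hp, hn, List.findIdx?_cons]
        · simp only [List.contains_iff_mem, hp, hn, decide_true, decide_false, if_true, if_false,
            List.findIdx?_cons]
          rw [pvScan_pos i rest (fn + 1) fn (fun g hg => hrel g hg i hp)]
          cases rest.findIdx? (fun f => decide ((-i) ∈ f)) with
          | none => simp
          | some b => simp; ring_nf
      · by_cases hn : (-i) ∈ f
        · simp only [List.contains_iff_mem, hp, hn, decide_true, decide_false, if_true, if_false,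
            List.findIdx?_cons]
          rw [pvScan_neg i rest (fn + 1) fn (fun g hg => hrel g hg (-i) hn)]
          cases rest.findIdx? (fun f => decide (i ∈ f)) with
          | none => simp
          | some a => simp; ring_nf
        · simp only [List.contains_iff_mem, hp, hn, decide_false, if_false, List.findIdx?_cons]
          rw [ih (fn + 1) hrest]
          cases rest.findIdx? (fun f => decide ((-i) ∈ f)) with
          | none => cases rest.findIdx? (fun f => decide (i ∈ f)) <;> simp
          | some b =>
              cases rest.findIdx? (fun f => decide (i ∈ f)) with
              | none => simp
              | some a => simp; constructor <;> ring_nf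

-- one floor of B's indexing pass
theorem pvBuildPos_floor (floor : List Int) (d : PySem.Dict Int Int) (v x : Int) :
    (floor.foldl (fun d y => if d.contains y then d else d.insert y v) d).get? x
      = (d.get? x).orElse (fun _ => if floor.contains x then some v else none) := by
  induction floor generalizing d with
  | nil => cases hdx : d.get? x <;> simp [Option.orElse, hdx]
  | cons y ys ih =>
      rw [List.foldl_cons, ih]
      by_cases hc : d.contains y = true
      · rw [if_pos hc]
        by_cases hxy : x = y
        · subst hxy
          rw [PySem.Dict.contains_eq_isSome_get?] at hc
          rcases Option.isSome_iff_exists.mp hc with ⟨w, hw⟩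
          simp [hw, Option.orElse]
        · simp [hxy]
      · rw [if_neg hc]
        by_cases hxy : x = y
        · subst hxy
          have hdx : d.get? x = none := by
            rw [PySem.Dict.contains_eq_isSome_get?] at hc
            simpa using hc
          simp [hdx, Option.orElse]
        · simp [PySem.Dict.get?_insert, hxy]

-- B's index maps each value to the first floor containing it
theorem pvBuildPos_go (floors : List (List Int)) (d : PySem.Dict Int Int) (s x : Int) :
    ((PySem.List.enumerate floors s).foldl
        (fun d p => p.2.foldl (fun d x => if d.contains x then d else d.insert x p.1) d) d).get? x
      = (d.get? x).orElse
          (fun _ => (floors.findIdx? (fun f => decide (x ∈ f))).map (fun k => (s + (k : Int)))) := by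
  induction floors generalizing d s with
  | nil => cases hdx : d.get? x <;> simp [Option.orElse, hdx]
  | cons f rest ih =>
      rw [PySem.List.enumerate_cons, List.foldl_cons, ih, pvBuildPos_floor]
      cases hdx : d.get? x with
      | some w => simp [Option.orElse]
      | none =>
          simp only [Option.orElse]
          by_cases hc : x ∈ f
          · simp [hc, List.findIdx?_cons]
          · simp only [List.contains_iff_mem, hc, decide_false, if_false, List.findIdx?_cons]
            cases rest.findIdx? (fun f => decide (x ∈ f)) with
            | none => simp
            | some k => simp; ring_nf

theorem pvBuildPos_get? (floors : List (List Int)) (x : Int) :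
    (pvBuildPos floors).get? x
      = (floors.findIdx? (fun f => decide (x ∈ f))).map (fun k => ((k : Int))) := by
  rw [pvBuildPos, pvBuildPos_go]
  cases floors.findIdx? (fun f => decide (x ∈ f)) <;>
    simp [PySem.Dict.get?_empty, Option.orElse]

-- per-state equality of the two pair-set computations
theorem pvPairs_eq (floors : List (List Int)) (maxi : Int)
    (hd : floors.Pairwise (fun a b => ∀ x ∈ a, x ∉ b)) :
    pvPairsB floors maxi = pvPairsA floors maxi := by
  unfold pvPairsA pvPairsB
  have hfun : (fun (s : PySem.Set (Int × Int)) (i : Int) =>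
      match (pvBuildPos floors).get? (-i), (pvBuildPos floors).get? i with
      | some n, some p => PySem.Set.add s (n, p)
      | _, _ => s)
      = (fun (s : PySem.Set (Int × Int)) (i : Int) =>
      match pvScan i floors 0 none none with
      | some p => PySem.Set.add s p
      | none => s) := by
    funext s i
    rw [pvBuildPos_get? floors (-i), pvBuildPos_get? floors i, pvScan_eq i floors 0 hd]
    cases floors.findIdx? (fun f => decide ((-i) ∈ f)) with
    | none => cases floors.findIdx? (fun f => decide (i ∈ f)) <;> simp
    | some b => cases floors.findIdx? (fun f => decide (i ∈ f)) <;> simp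
  rw [hfun]

-- a passed length check forces equal lengths at every listed in-range index
theorem pvLenAny_false_all (f1 f2 : List (List Int)) (l : List Nat)
    (h : pvLenAny f1 f2 l = some false) :
    ∀ i ∈ l, ∀ a b, f1[i]? = some a → f2[i]? = some b → a.length = b.length := by
  induction l with
  | nil => intro i hi; simp at hi
  | cons j rest ih =>
      intro i hi a b ha hb
      rw [pvLenAny] at h
      cases hx : f1[j]? with
      | none => rw [hx] at h; simp at h
      | some u =>
          cases hy : f2[j]? with
          | none => rw [hx, hy] at h; simp at h
          | some v =>
              rw [hx, hy] at h
              change (if u.length ≠ v.length then some true else pvLenAny f1 f2 rest)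
                  = some false at h
              split_ifs at h with hne
              · simp at h
              · rcases List.mem_cons.mp hi with rfl | hmem
                · rw [hx] at ha; rw [hy] at hb
                  cases ha; cases hb; omega
                · exact ih h i hmem a b ha hb

-- B's length-list entry at an in-range index
theorem pvLens4_getElem? (f : List (List Int)) (i : Nat) (hi : i < 4) (hl : i < f.length) :
    (pvLens4 f)[i]? = some (PySem.List.len (f.getD i [])) := by
  unfold pvLens4
  have hs : PySem.List.slice f none (some 4) = f.take 4 := by
    exact_mod_cast PySem.List.slice_to_natCast (xs := f) (b := 4)
  rw [hs, List.getElem?_map, List.getElem?_take_of_lt hi]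
  rw [List.getElem?_eq_getElem hl, List.getD_eq_getElem _ _ hl]
  rfl

-- on a length mismatch inside the scanned range, B's sliced length lists differ
theorem pvLens4_ne (f1 f2 : List (List Int)) (i : Nat)
    (hi : i < min 4 (min f1.length f2.length))
    (hne : (f1.getD i []).length ≠ (f2.getD i []).length) :
    pvLens4 f1 ≠ pvLens4 f2 := by
  intro heq
  have h1 : i < f1.length := lt_of_lt_of_le hi (le_trans (min_le_right _ _) (min_le_left _ _))
  have h2 : i < f2.length := lt_of_lt_of_le hi (le_trans (min_le_right _ _) (min_le_right _ _))
  have h4 : i < 4 := lt_of_lt_of_le hi (min_le_left _ _)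
  have : (pvLens4 f1)[i]? = (pvLens4 f2)[i]? := by rw [heq]
  rw [pvLens4_getElem? f1 i h4 h1, pvLens4_getElem? f2 i h4 h2] at this
  simp only [Option.some.injEq, PySem.List.len] at this
  omega

-- on a length mismatch inside the scanned range, A's any() never reaches 'all equal'
theorem pvLenAny_ne_false (f1 f2 : List (List Int)) (i : Nat)
    (hi : i < min 4 (min f1.length f2.length))
    (hne : (f1.getD i []).length ≠ (f2.getD i []).length) :
    pvLenAny f1 f2 [0, 1, 2, 3] ≠ some false := by
  intro h
  have h1 : i < f1.length := lt_of_lt_of_le hi (le_trans (min_le_right _ _) (min_le_left _ _))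
  have h2 : i < f2.length := lt_of_lt_of_le hi (le_trans (min_le_right _ _) (min_le_right _ _))
  have h4 : i < 4 := lt_of_lt_of_le hi (min_le_left _ _)
  have hmem : i ∈ [0, 1, 2, 3] := by
    simp only [List.mem_cons, List.not_mem_nil, or_false]; omega
  have := pvLenAny_false_all f1 f2 [0, 1, 2, 3] h i hmem (f1.getD i []) (f2.getD i [])
    (by rw [List.getElem?_eq_getElem h1, List.getD_eq_getElem _ _ h1])
    (by rw [List.getElem?_eq_getElem h2, List.getD_eq_getElem _ _ h2])
  exact hne this

-- with at least four floors on each side, the two length guards agree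
theorem guard_iff (f1 f2 : List (List Int)) (h1 : 4 ≤ f1.length) (h2 : 4 ≤ f2.length) :
    pvLens4 f1 = pvLens4 f2 ↔ pvLenAny f1 f2 [0, 1, 2, 3] = some false := by
  obtain ⟨a1, r1, rfl⟩ : ∃ a r, f1 = a :: r := by
    cases f1 with | nil => simp at h1 | cons a r => exact ⟨a, r, rfl⟩
  obtain ⟨a2, r2, rfl⟩ : ∃ a r, r1 = a :: r := by
    cases r1 with | nil => simp at h1 | cons a r => exact ⟨a, r, rfl⟩
  obtain ⟨a3, r3, rfl⟩ : ∃ a r, r2 = a :: r := by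
    cases r2 with | nil => simp at h1 | cons a r => exact ⟨a, r, rfl⟩
  obtain ⟨a4, r4, rfl⟩ : ∃ a r, r3 = a :: r := by
    cases r3 with | nil => simp at h1 | cons a r => exact ⟨a, r, rfl⟩
  obtain ⟨b1, s1, rfl⟩ : ∃ a r, f2 = a :: r := by
    cases f2 with | nil => simp at h2 | cons a r => exact ⟨a, r, rfl⟩
  obtain ⟨b2, s2, rfl⟩ : ∃ a r, s1 = a :: r := by
    cases s1 with | nil => simp at h2 | cons a r => exact ⟨a, r, rfl⟩
  obtain ⟨b3, s3, rfl⟩ : ∃ a r, s2 = a :: r := by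
    cases s2 with | nil => simp at h2 | cons a r => exact ⟨a, r, rfl⟩
  obtain ⟨b4, s4, rfl⟩ : ∃ a r, s3 = a :: r := by
    cases s3 with | nil => simp at h2 | cons a r => exact ⟨a, r, rfl⟩
  unfold pvLens4
  have hs : ∀ (f : List (List Int)), PySem.List.slice f none (some 4) = f.take 4 := fun f => by
    exact_mod_cast PySem.List.slice_to_natCast (xs := f) (b := 4)
  rw [hs, hs]
  simp only [List.take_succ_cons, List.take_zero, List.map_cons, List.map_nil]
  constructor
  · intro h
    simp only [List.cons.injEq, and_true] at h
    obtain ⟨e1, e2, e3, e4⟩ := h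
    simp only [PySem.List.len] at e1 e2 e3 e4
    have l1 : a1.length = b1.length := by omega
    have l2 : a2.length = b2.length := by omega
    have l3 : a3.length = b3.length := by omega
    have l4 : a4.length = b4.length := by omega
    simp only [pvLenAny, List.getElem?_cons_zero, List.getElem?_cons_succ, l1, l2, l3, l4]
    simp
  · intro h
    have e0 := pvLenAny_false_all _ _ _ h 0 (by simp) a1 b1 (by simp) (by simp)
    have e1 := pvLenAny_false_all _ _ _ h 1 (by simp) a2 b2 (by simp) (by simp)
    have e2 := pvLenAny_false_all _ _ _ h 2 (by simp) a3 b3 (by simp) (by simp)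
    have e3 := pvLenAny_false_all _ _ _ h 3 (by simp) a4 b4 (by simp) (by simp)
    simp only [PySem.List.len, List.cons.injEq, and_true]
    omega

-- the two max computations agree whenever some floor of floors1 is non-empty
theorem pvMax_eq (floors : List (List Int)) (hne : ∃ f ∈ floors, f ≠ ([] : List Int)) :
    pvMaxFlat floors = pvMaxA floors := by
  obtain ⟨f0, hf0, hf0ne⟩ := hne
  -- both sides are 'some' of an element
  have hflat_ne : floors.flatMap (fun f => f) ≠ [] := by
    intro h
    rcases List.exists_mem_of_ne_nil f0 hf0ne with ⟨x, hx⟩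
    have : x ∈ floors.flatMap (fun f => f) := List.mem_flatMap.mpr ⟨f0, hf0, hx⟩
    simp [h] at this
  have hlistA_ne : (floors.filter (fun f => decide (0 < f.length))).map
      (fun f => (PySem.List.max? f (fun x => x)).getD 0) ≠ [] := by
    intro h
    have : f0 ∈ floors.filter (fun f => decide (0 < f.length)) := by
      rw [List.mem_filter]
      refine ⟨hf0, by simp [List.length_pos_iff, hf0ne]⟩
    rw [List.map_eq_nil_iff] at h
    rw [h] at this
    simp at this
  cases hB : pvMaxFlat floors with
  | none =>
      exact absurd ((PySem.List.max?_eq_none_iff _ _).mp hB) hflat_ne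
  | some mb =>
      cases hA : pvMaxA floors with
      | none =>
          exact absurd ((PySem.List.max?_eq_none_iff _ _).mp hA) hlistA_ne
      | some ma =>
          -- mb ∈ flatten; ma is a floor max
          have hmbmem := PySem.List.max?_mem hB
          have hmamem := PySem.List.max?_mem hA
          have hmbmax := PySem.List.max?_isMax hB
          have hmamax := PySem.List.max?_isMax hA
          -- ma ≤ mb : ma is (max? f).getD 0 of a non-empty floor f, hence an element of flatten
          have hma_le : ma ≤ mb := by
            rcases List.mem_map.mp hmamem with ⟨f, hf, hfeq⟩
            rcases List.mem_filter.mp hf with ⟨hfmem, hflen⟩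
            have hfne : f ≠ [] := by
              intro h; rw [h] at hflen; simp at hflen
            cases hmf : PySem.List.max? f (fun x => x) with
            | none => exact absurd ((PySem.List.max?_eq_none_iff _ _).mp hmf) hfne
            | some mf =>
                rw [hmf] at hfeq
                simp only [Option.getD_some] at hfeq
                have hmem : mf ∈ floors.flatMap (fun f => f) :=
                  List.mem_flatMap.mpr ⟨f, hfmem, PySem.List.max?_mem hmf⟩
                rw [← hfeq]
                exact hmbmax mf hmem
          -- mb ≤ ma : mb lies in some floor f; mb ≤ max f, and max f is in A's list
          have hmb_le : mb ≤ ma := by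
            rcases List.mem_flatMap.mp hmbmem with ⟨f, hfmem, hmbf⟩
            have hfne : f ≠ [] := by
              intro h; rw [h] at hmbf; simp at hmbf
            cases hmf : PySem.List.max? f (fun x => x) with
            | none => exact absurd ((PySem.List.max?_eq_none_iff _ _).mp hmf) hfne
            | some mf =>
                have h1 : mb ≤ mf := PySem.List.max?_isMax hmf mb hmbf
                have h2 : mf ≤ ma := by
                  apply hmamax
                  apply List.mem_map.mpr
                  refine ⟨f, ?_, by rw [hmf]; rfl⟩
                  rw [List.mem_filter]
                  exact ⟨hfmem, by simp [List.length_pos_iff, hfne]⟩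
                exact le_trans h1 h2
          exact congrArg some (le_antisymm hmb_le hma_le)

-- ===== VERDICT (by name: the statement is the Claim_ definition above) =====
theorem state_equivalent_spec : Claim_equal_state_equivalent := by
  intro s1 s2 _ hpre
  unfold Spec_state_equivalent state_equivalent state_equivalent_alt
  by_cases he : s1.2 ≠ s2.2
  · simp [he]
  · simp only [he, if_false]
    rcases hpre with h | h | h
    · exact absurd h he
    · -- a length mismatch inside the range both guards scan: both sides return false
      obtain ⟨i, hi, hne⟩ := h
      have hBne : pvLens4 s1.1 ≠ pvLens4 s2.1 := pvLens4_ne s1.1 s2.1 i hi hne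
      have hAne : pvLenAny s1.1 s2.1 [0, 1, 2, 3] ≠ some false :=
        pvLenAny_ne_false s1.1 s2.1 i hi hne
      simp only [hBne, ne_eq]
      cases hA : pvLenAny s1.1 s2.1 [0, 1, 2, 3] with
      | none => simp
      | some b =>
          cases b with
          | true => simp
          | false => exact absurd hA hAne
    · obtain ⟨hl1, hl2, hne, hd1, hd2⟩ := h
      by_cases hguard : pvLens4 s1.1 = pvLens4 s2.1
      · have hAfalse : pvLenAny s1.1 s2.1 [0, 1, 2, 3] = some false :=
          (guard_iff s1.1 s2.1 hl1 hl2).mp hguard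
        rw [hAfalse]
        simp only [hguard, ne_eq, not_true_eq_false, if_false]
        rw [pvMax_eq s1.1 hne]
        cases hmax : pvMaxA s1.1 with
        | none => rfl
        | some maxi =>
            show PySem.Set.equal (pvPairsA s1.1 maxi) (pvPairsA s2.1 maxi)
                = PySem.Set.equal (pvPairsB s1.1 maxi) (pvPairsB s2.1 maxi)
            rw [pvPairs_eq s1.1 maxi hd1, pvPairs_eq s2.1 maxi hd2]
      · have hAne : pvLenAny s1.1 s2.1 [0, 1, 2, 3] ≠ some false := by
          intro hA
          exact hguard ((guard_iff s1.1 s2.1 hl1 hl2).mpr hA)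
        simp only [hguard, if_true, ne_eq, not_false_eq_true]
        cases hA : pvLenAny s1.1 s2.1 [0, 1, 2, 3] with
        | none => simp
        | some b =>
            cases b with
            | true => simp
            | false => exact absurd hA hAne
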